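-- pv_equiv track=rewrite | github.com/ADHARSH45/DSA | medium/minswap_to_make_even_odd_seperate.py | calculate_min_swap
-- ===== SOURCE A (Python) =====
-- def calculate_min_swap(arr,n):
--   pos = 0
--   swaps = 0
--   for i in range(len(arr)):
--     if arr[i] % 2 == n:
--       swaps += abs(i - pos)
--       pos += 1
--   return swaps
-- ===== SOURCE B (Python) =====
-- def calculate_min_swap(arr, n):
--   idxs = [i for i, x in enumerate(arr) if x % 2 == n]
--   k = len(idxs)
--   return sum(idxs) - k * (k - 1) // 2
-- ===== Notes on version B (the rewrite author's own statement) =====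
-- stated objective: simpler
-- what changed: Replaced the running pos pointer and incremental |i-pos| accumulation by collecting the matching indices and returning the closed form sum(idxs) - k*(k-1)//2, since the j-th match contributes index_j - j.
import Mathlib
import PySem

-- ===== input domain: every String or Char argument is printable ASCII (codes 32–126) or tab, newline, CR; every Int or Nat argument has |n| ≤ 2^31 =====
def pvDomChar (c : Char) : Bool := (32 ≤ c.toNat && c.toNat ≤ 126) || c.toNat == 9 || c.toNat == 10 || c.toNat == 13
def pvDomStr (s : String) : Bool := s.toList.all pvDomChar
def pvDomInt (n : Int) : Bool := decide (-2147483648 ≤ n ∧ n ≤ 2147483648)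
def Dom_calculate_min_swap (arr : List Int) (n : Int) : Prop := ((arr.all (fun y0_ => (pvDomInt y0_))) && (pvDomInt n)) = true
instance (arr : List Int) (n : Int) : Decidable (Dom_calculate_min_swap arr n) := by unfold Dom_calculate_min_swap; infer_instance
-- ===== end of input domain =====

-- B replaces A's running pos pointer and incremental |i-pos| accumulation by the
-- closed form sum(matching indices) - k*(k-1)//2 (objective: simpler).

-- ===== PORT A =====
-- the for-loop over range(len(arr)) with state (pos, swaps)
def cmsLoop (n : Int) : List Int → Int → Int → Int → Int
  | [], _, _, swaps => swaps
  | x :: xs, i, pos, swaps =>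
    if PySem.Int.mod x 2 = n then cmsLoop n xs (i + 1) (pos + 1) (swaps + |i - pos|)
    else cmsLoop n xs (i + 1) pos swaps

def calculate_min_swap (arr : List Int) (n : Int) : Int := cmsLoop n arr 0 0 0

-- ===== PORT B =====
def calculate_min_swap_alt (arr : List Int) (n : Int) : Int :=
  let idxs := ((PySem.List.enumerate arr 0).filter (fun p => PySem.Int.mod p.2 2 = n)).map (·.1)
  let k : Int := idxs.length
  idxs.sum - PySem.Int.floordiv (k * (k - 1)) 2

-- ===== PRECONDITION & SPEC =====
def Spec_calculate_min_swap (arr : List Int) (n : Int) (out : Int) : Prop := out = calculate_min_swap_alt arr n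
instance (arr : List Int) (n : Int) (out : Int) : Decidable (Spec_calculate_min_swap arr n out) := by unfold Spec_calculate_min_swap; infer_instance

-- ===== CLAIM (what is proved, stated in full; the proofs are below) =====
def Claim_equal_calculate_min_swap : Prop := ∀ (arr : List Int) (n : Int), Dom_calculate_min_swap arr n → Spec_calculate_min_swap arr n (calculate_min_swap arr n)

-- ===== LEMMAS AND PROOFS =====

-- the list of indices (starting at i) of elements with the wanted parity
def midx (n : Int) : List Int → Int → List Int
  | [], _ => []
  | x :: xs, i => if PySem.Int.mod x 2 = n then i :: midx n xs (i + 1) else midx n xs (i + 1)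

def tri (k : Nat) : Int := ((k * (k - 1)) / 2 : Nat)

theorem tri_succ (k : Nat) : tri (k + 1) = tri k + k := by
  unfold tri
  have h : (k + 1) * k = k * (k - 1) + 2 * k := by cases k with
    | zero => rfl
    | succ m => simp only [Nat.add_sub_cancel]; ring
  rw [Nat.add_sub_cancel, h, Nat.add_mul_div_left _ _ (by norm_num : 0 < 2)]
  push_cast; ring

theorem cmsLoop_closed (n : Int) (xs : List Int) :
    ∀ (i pos swaps : Int), pos ≤ i →
      cmsLoop n xs i pos swaps
        = swaps + (midx n xs i).sum - (midx n xs i).length * pos - tri (midx n xs i).length := by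
  induction xs with
  | nil => intro i pos swaps _; simp [cmsLoop, midx, tri]
  | cons x xs ih =>
    intro i pos swaps hpi
    simp only [cmsLoop, midx]
    by_cases hm : PySem.Int.mod x 2 = n
    · rw [if_pos hm, if_pos hm]
      rw [ih (i + 1) (pos + 1) _ (by omega), abs_of_nonneg (by omega : (0:Int) ≤ i - pos)]
      simp only [List.sum_cons, List.length_cons, tri_succ]
      push_cast; ring
    · rw [if_neg hm, if_neg hm]
      exact ih (i + 1) pos swaps (by omega)

theorem filter_enumerate_eq_midx (n : Int) (xs : List Int) :
    ∀ (s : Int),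
      ((PySem.List.enumerate xs s).filter (fun p => PySem.Int.mod p.2 2 = n)).map (·.1)
        = midx n xs s := by
  induction xs with
  | nil => intro s; simp [PySem.List.enumerate_nil, midx]
  | cons x xs ih =>
    intro s
    rw [PySem.List.enumerate_cons]
    simp only [List.filter_cons, midx, decide_eq_true_eq]
    split_ifs with hm
    · rw [List.map_cons, ih]
    · exact ih (s + 1)

theorem floordiv_tri (k : Nat) :
    PySem.Int.floordiv ((k : Int) * ((k : Int) - 1)) 2 = tri k := by
  cases k with
  | zero => decide
  | succ m =>
    have h : ((m + 1 : Nat) : Int) * (((m + 1 : Nat) : Int) - 1) = (((m + 1) * m : Nat) : Int) := by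
      push_cast; ring
    rw [h]
    unfold tri
    rw [Nat.add_sub_cancel]
    exact_mod_cast PySem.Int.floordiv_natCast ((m + 1) * m) 2

-- ===== VERDICT (by name: the statement is the Claim_ definition above) =====
theorem calculate_min_swap_spec : Claim_equal_calculate_min_swap := by
  intro arr n _
  unfold Spec_calculate_min_swap calculate_min_swap calculate_min_swap_alt
  rw [cmsLoop_closed n arr 0 0 0 le_rfl]
  simp only [filter_enumerate_eq_midx, floordiv_tri]
  ring
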